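-- pv_equiv track=rewrite | github.com/ChrisBetancur/OldPycharm | pythonProject/DataStructures/Matrix.py | delete_value_from_matrix
-- ===== SOURCE A (Python) =====
-- def is_contains_value(matrix, value):
--     if matrix is not None:
--         for row in matrix:
--             for curr_value in row:
--                 if curr_value == value:
--                     return True
--     return False
--
-- def delete_value_from_matrix(matrix, value):
--     if is_contains_value(matrix, value) is False:
--         return
--
--     row_counter = 0
--     for row in matrix:
--         col_counter = 0
--         for curr_value in row:
--             if curr_value is value:
--                 matrix[row_counter][col_counter] = 0
--             col_counter += 1
--         row_counter += 1
--     return matrix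
-- ===== SOURCE B (Python) =====
-- def delete_value_from_matrix(matrix, value):
--     # Single pass: detect and zero in one traversal, building a fresh matrix
--     # (A mutates in place; the equivalence is about the return value only).
--     found = False
--     out = []
--     for row in matrix:
--         new_row = []
--         for v in row:
--             if v == value:
--                 found = True
--                 new_row.append(0)
--             else:
--                 new_row.append(v)
--         out.append(new_row)
--     if found:
--         return out
--     return None
-- ===== Notes on version B (the rewrite author's own statement) =====
-- stated objective: simpler
-- what changed: Fuses A's two full traversals (helper presence scan, then an index-counter mutation scan) into ONE pass that simultaneously sets a found flag and builds the zeroed matrix, returning it only if the flag is set; B builds a fresh matrix instead of mutating the argument. Pre_ excludes inputs where value occurs in the matrix but lies outside CPython's small-int cache [-5,256], where A's `is` comparison makes the result depend on object identity rather than on the argument values.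
-- outside the precondition, e.g. on delete_value_from_matrix([[1000, 2]], 1000): A returns [[1000, 2]], B returns [[0, 2]]
import Mathlib
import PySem

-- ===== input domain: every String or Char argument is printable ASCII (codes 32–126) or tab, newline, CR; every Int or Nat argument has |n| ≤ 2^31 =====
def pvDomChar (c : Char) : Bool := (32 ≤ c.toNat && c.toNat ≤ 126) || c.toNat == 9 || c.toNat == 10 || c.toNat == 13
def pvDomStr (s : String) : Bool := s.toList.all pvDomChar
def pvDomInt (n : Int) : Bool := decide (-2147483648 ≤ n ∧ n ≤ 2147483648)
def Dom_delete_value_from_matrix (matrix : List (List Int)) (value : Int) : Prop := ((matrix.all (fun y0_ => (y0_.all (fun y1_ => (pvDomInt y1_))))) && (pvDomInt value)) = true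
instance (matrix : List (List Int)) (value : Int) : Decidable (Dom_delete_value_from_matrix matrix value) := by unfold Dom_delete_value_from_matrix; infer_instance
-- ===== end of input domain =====

-- B fuses A's two full traversals (helper presence scan + index-counter in-place mutation scan)
-- into one pass that sets a found flag and builds the zeroed matrix together (simpler; same cost).
-- A mutates its argument in place when it returns the matrix, B builds a fresh matrix: the
-- equivalence proved is about the RETURN value only.

-- ===== PORT A =====
def is_contains_value (matrix : List (List Int)) (value : Int) : Bool :=
  matrix.any (fun row => row.any (fun curr => curr == value))

-- Python's `curr_value is value` on ints is modeled as value equality restricted to CPython's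
-- small-int cache -5 ≤ value ≤ 256 (exact for freshly decoded arguments, where equal ints outside
-- the cache are distinct objects); Pre_ keeps the inputs where this identity question cannot arise
-- or is resolved by the cache.
def delete_value_from_matrix (matrix : List (List Int)) (value : Int) : Option (List (List Int)) :=
  if is_contains_value matrix value = false then none
  else
    some ((matrix.foldl
      (fun (st : List (List Int) × Nat) row =>
        (st.1.set st.2
          ((row.foldl
            (fun (st2 : List Int × Nat) curr =>
              (if curr = value ∧ (-5 ≤ value ∧ value ≤ 256) then st2.1.set st2.2 0 else st2.1,
               st2.2 + 1))
            (row, 0)).1),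
         st.2 + 1))
      (matrix, 0)).1)

-- ===== PORT B =====
-- single pass carrying (found, out) as the fold state, exactly as Source B's loop does
def delete_value_from_matrix_alt (matrix : List (List Int)) (value : Int) : Option (List (List Int)) :=
  let st := matrix.foldl
    (fun (st : Bool × List (List Int)) row =>
      let st2 := row.foldl
        (fun (s : Bool × List Int) v =>
          if v == value then (true, s.2 ++ [0]) else (s.1, s.2 ++ [v]))
        (st.1, [])
      (st2.1, st.2 ++ [st2.2]))
    (false, [])
  if st.1 then some st.2 else none

-- ===== PRECONDITION & SPEC =====
-- Pre_ excludes inputs on which A still returns a value: those where `value` occurs in the matrix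
-- but lies outside CPython's small-int cache [-5, 256], where A's `is` comparison makes the result
-- depend on object identity (interning) rather than on the argument values.
def Pre_delete_value_from_matrix (matrix : List (List Int)) (value : Int) : Prop :=
  (∃ row ∈ matrix, value ∈ row) → (-5 ≤ value ∧ value ≤ 256)
instance (matrix : List (List Int)) (value : Int) : Decidable (Pre_delete_value_from_matrix matrix value) := by unfold Pre_delete_value_from_matrix; infer_instance

def pvWitness_delete_value_from_matrix : List (List Int) × Int := ([[1, 2], [3]], 2)

def Spec_delete_value_from_matrix (matrix : List (List Int)) (value : Int) (out : Option (List (List Int))) : Prop := out = delete_value_from_matrix_alt matrix value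
instance (matrix : List (List Int)) (value : Int) (out : Option (List (List Int))) : Decidable (Spec_delete_value_from_matrix matrix value out) := by unfold Spec_delete_value_from_matrix; infer_instance

-- ===== CLAIM (what is proved, stated in full; the proofs are below) =====
def Claim_equal_delete_value_from_matrix : Prop := ∀ (matrix : List (List Int)) (value : Int), Dom_delete_value_from_matrix matrix value → Pre_delete_value_from_matrix matrix value → Spec_delete_value_from_matrix matrix value (delete_value_from_matrix matrix value)

-- ===== LEMMAS AND PROOFS =====

-- A's mutation fold: a fold that walks l with a running index, rewriting the element under the
-- index in its state, computes pre ++ l.map f when the state starts as pre ++ l at index pre.length.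
theorem pv_foldl_set_map {α : Type} (s : List α × Nat → α → List α × Nat) (f : α → α)
    (hs : ∀ (pre t : List α) (x : α), s (pre ++ x :: t, pre.length) x = (pre ++ f x :: t, pre.length + 1)) :
    ∀ (l pre : List α), (l.foldl s (pre ++ l, pre.length)).1 = pre ++ l.map f := by
  intro l
  induction l with
  | nil => intro pre; simp
  | cons x t ih =>
    intro pre
    have h1 : (x :: t).foldl s (pre ++ x :: t, pre.length)
        = t.foldl s (pre ++ f x :: t, pre.length + 1) := by
      simp [List.foldl_cons, hs pre t x]
    have h2 := ih (pre ++ [f x])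
    rw [h1]
    simpa [List.append_assoc] using h2

theorem pv_inner_row (value : Int) (hc : -5 ≤ value ∧ value ≤ 256) (row : List Int) :
    ((row.foldl
      (fun (st2 : List Int × Nat) curr =>
        (if curr = value ∧ (-5 ≤ value ∧ value ≤ 256) then st2.1.set st2.2 0 else st2.1,
         st2.2 + 1))
      (row, 0)).1) = row.map (fun v => if v == value then 0 else v) := by
  have h := pv_foldl_set_map
    (fun (st2 : List Int × Nat) curr =>
      (if curr = value ∧ (-5 ≤ value ∧ value ≤ 256) then st2.1.set st2.2 0 else st2.1, st2.2 + 1))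
    (fun v => if v == value then 0 else v)
    (by
      intro pre t x
      by_cases hx : x = value
      · simp [hx, hc]
      · simp [hx])
    row []
  simpa using h

theorem pv_outer (matrix : List (List Int)) (value : Int) (hc : -5 ≤ value ∧ value ≤ 256) :
    ((matrix.foldl
      (fun (st : List (List Int) × Nat) row =>
        (st.1.set st.2
          ((row.foldl
            (fun (st2 : List Int × Nat) curr =>
              (if curr = value ∧ (-5 ≤ value ∧ value ≤ 256) then st2.1.set st2.2 0 else st2.1,
               st2.2 + 1))
            (row, 0)).1),
         st.2 + 1))
      (matrix, 0)).1) = matrix.map (fun row => row.map (fun v => if v == value then 0 else v)) := by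
  have h := pv_foldl_set_map
    (fun (st : List (List Int) × Nat) row =>
      (st.1.set st.2
        ((row.foldl
          (fun (st2 : List Int × Nat) curr =>
            (if curr = value ∧ (-5 ≤ value ∧ value ≤ 256) then st2.1.set st2.2 0 else st2.1,
             st2.2 + 1))
          (row, 0)).1),
       st.2 + 1))
    (fun row => row.map (fun v => if v == value then 0 else v))
    (by
      intro pre t x
      simp [pv_inner_row value hc x])
    matrix []
  simpa using h

-- B's inner fold yields (found OR row contains value, acc ++ zeroed row)
theorem pv_b_inner (value : Int) :
    ∀ (row : List Int) (f0 : Bool) (acc : List Int),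
    row.foldl
      (fun (s : Bool × List Int) v =>
        if v == value then (true, s.2 ++ [0]) else (s.1, s.2 ++ [v]))
      (f0, acc)
    = (f0 || row.any (fun c => c == value),
       acc ++ row.map (fun v => if v == value then 0 else v)) := by
  intro row
  induction row with
  | nil => intro f0 acc; simp
  | cons x t ih =>
    intro f0 acc
    simp only [List.foldl_cons]
    by_cases hx : (x == value) = true
    · have hx' : x = value := by simpa using hx
      rw [if_pos hx, ih]; subst hx'; simp
    · have hb : (x == value) = false := by simpa using hx
      have hx' : ¬ x = value := by simpa using hx
      rw [if_neg hx, ih]; simp [hb, hx']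

-- B's outer fold yields (found OR matrix contains value, acc ++ zeroed matrix)
theorem pv_b_outer (value : Int) :
    ∀ (matrix : List (List Int)) (f0 : Bool) (acc : List (List Int)),
    matrix.foldl
      (fun (st : Bool × List (List Int)) row =>
        let st2 := row.foldl
          (fun (s : Bool × List Int) v =>
            if v == value then (true, s.2 ++ [0]) else (s.1, s.2 ++ [v]))
          (st.1, [])
        (st2.1, st.2 ++ [st2.2]))
      (f0, acc)
    = (f0 || matrix.any (fun row => row.any (fun c => c == value)),
       acc ++ matrix.map (fun row => row.map (fun v => if v == value then 0 else v))) := by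
  intro matrix
  induction matrix with
  | nil => intro f0 acc; simp
  | cons r t ih =>
    intro f0 acc
    simp only [List.foldl_cons, pv_b_inner value r, ih, List.any_cons, List.map_cons]
    simp [Bool.or_assoc]

-- ===== VERDICT (by name: the statement is the Claim_ definition above) =====
theorem delete_value_from_matrix_spec : Claim_equal_delete_value_from_matrix := by
  intro matrix value _hDom hPre
  unfold Spec_delete_value_from_matrix delete_value_from_matrix delete_value_from_matrix_alt
  simp only [pv_b_outer value matrix false [], Bool.false_or, List.nil_append]
  by_cases hc : is_contains_value matrix value = false
  · have ha : (matrix.any fun row => row.any fun c => c == value) = false := by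
      simpa [is_contains_value] using hc
    simp [hc, ha]
  · have hc' : (matrix.any fun row => row.any fun c => c == value) = true := by
      simpa [is_contains_value, Bool.not_eq_false] using hc
    have hmem : ∃ row ∈ matrix, value ∈ row := by
      simp only [List.any_eq_true, beq_iff_eq] at hc'
      obtain ⟨row, hr, c, hcmem, rfl⟩ := hc'
      exact ⟨row, hr, hcmem⟩
    have hcache := hPre hmem
    simp [hc, hc', pv_outer matrix value hcache]
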